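-- pv_equiv track=rewrite | github.com/Ohwooseok/CodingTest | 프로그래머스/2/258711. 도넛과 막대 그래프/도넛과 막대 그래프.py | solution
-- ===== SOURCE A (Python) =====
-- from collections import deque
-- from collections import defaultdict
--
-- def solution(edges):
--
--     graph = defaultdict(list)
--     indec = defaultdict(int)
--     outdec = defaultdict(int)
--
--     for a, b in edges:
--         graph[a].append(b)
--         indec[b] += 1
--         outdec[a] += 1
--
--     start = 0
--     for nxt in graph.keys():
--         if indec[nxt] == 0 and outdec[nxt] >= 2:
--             start = nxt
--
--     visited = set([start])
--
--     donut = 0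
--     mak = 0
--     eig = 0
--
--     for n in graph[start]:
--         nodes = set()
--         q = deque([n])
--
--         makdae = False
--         eight = False
--
--         while q:
--             s = q.popleft()
--
--             nodes.add(s)
--             if outdec[s] == 0:
--                 makdae = True
--             if outdec[s] == 2:
--                 eight = True
--
--             for nxt in graph[s]:
--                 if nxt not in nodes:
--                     q.append(nxt)
--
--         if makdae:
--             mak += 1
--         elif eight:
--             eig += 1
--         else:
--             donut += 1
--
--         visited = set(nodes)
--
--
--
--     answer = [start, donut, mak, eig ]
--     return answer
-- ===== SOURCE B (Python) =====
-- def solution(edges):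
--     # Saturation-based reachability instead of a BFS queue; degrees read off
--     # the successor lists (len) and a target set, no separate degree dicts.
--     succ = {}
--     targets = set()
--     for a, b in edges:
--         succ.setdefault(a, []).append(b)
--         targets.add(b)
--
--     start = 0
--     for v in succ:
--         if v not in targets and len(succ[v]) >= 2:
--             start = v
--
--     donut = 0
--     mak = 0
--     eig = 0
--     for n in succ.get(start, []):
--         reach = {n}
--         changed = True
--         while changed:
--             changed = False
--             for v in list(reach):
--                 for w in succ.get(v, []):
--                     if w not in reach:
--                         reach.add(w)
--                         changed = True
--         if any(len(succ.get(v, [])) == 0 for v in reach):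
--             mak += 1
--         elif any(len(succ.get(v, [])) == 2 for v in reach):
--             eig += 1
--         else:
--             donut += 1
--
--     return [start, donut, mak, eig]
-- ===== Notes on version B (the rewrite author's own statement) =====
-- stated objective: alternative
-- what changed: B replaces A's per-component BFS over an explicit deque (popleft, repeated enqueues, per-pop flag updates) by a saturate-to-fixpoint reachability set, and drops both degree dictionaries, reading out-degrees as successor-list lengths and 'in-degree zero' as absence from a set of edge targets.
import Mathlib
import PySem

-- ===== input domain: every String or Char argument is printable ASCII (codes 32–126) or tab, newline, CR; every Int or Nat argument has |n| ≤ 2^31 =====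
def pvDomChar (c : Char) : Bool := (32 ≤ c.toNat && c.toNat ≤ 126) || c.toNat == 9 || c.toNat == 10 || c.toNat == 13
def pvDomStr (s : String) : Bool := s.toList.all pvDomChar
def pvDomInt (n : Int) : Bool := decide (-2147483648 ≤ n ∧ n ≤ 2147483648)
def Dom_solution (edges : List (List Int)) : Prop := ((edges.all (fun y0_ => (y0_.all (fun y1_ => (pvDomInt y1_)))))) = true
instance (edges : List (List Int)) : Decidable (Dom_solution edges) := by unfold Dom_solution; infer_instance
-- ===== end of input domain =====

-- B replaces A's per-component BFS queue by a saturate-to-fixpoint reachability set and reads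
-- degrees off the successor lists / a target set instead of separate degree dictionaries (alternative, not faster).

-- ===== PORT A =====
-- one edge [a, b]: graph[a].append(b); indec[b] += 1; outdec[a] += 1  (defaultdict semantics)
def stepA (st : PySem.Dict Int (List Int) × PySem.Dict Int Int × PySem.Dict Int Int) (e : List Int) :
    PySem.Dict Int (List Int) × PySem.Dict Int Int × PySem.Dict Int Int :=
  match e with
  | [a, b] =>
      (st.1.insert a (st.1.getD a [] ++ [b]),
       st.2.1.insert b (st.2.1.getD b 0 + 1),
       st.2.2.insert a (st.2.2.getD a 0 + 1))
  | _ => st  -- unreachable under Pre_solution (Python raises ValueError on unpacking)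

def buildA (edges : List (List Int)) :
    PySem.Dict Int (List Int) × PySem.Dict Int Int × PySem.Dict Int Int :=
  edges.foldl stepA (PySem.Dict.empty, PySem.Dict.empty, PySem.Dict.empty)

-- every value stored in the adjacency dict is an endpoint of some edge (needed by the port for bfsGo's bounds)
lemma foldA_vals {U : List Int} : ∀ (es : List (List Int)) (g : PySem.Dict Int (List Int)) (i o : PySem.Dict Int Int),
    (∀ e ∈ es, ∀ y ∈ e, y ∈ U) → (∀ s t, t ∈ g.getD s [] → t ∈ U) →
    ∀ s t, t ∈ ((es.foldl stepA (g, i, o)).1.getD s []) → t ∈ U := by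
  intro es
  induction es with
  | nil => intro g i o _ hg s t ht; exact hg s t ht
  | cons e es ih =>
      intro g i o hes hg s t ht
      simp only [List.foldl_cons] at ht
      match e with
      | [a, b] =>
          refine ih _ _ _ (fun e' he' => hes e' (List.mem_cons_of_mem _ he')) ?_ s t ht
          intro s' t' ht'
          by_cases hsa : s' = a
          · rw [hsa, PySem.Dict.getD_insert_self] at ht'
            rcases List.mem_append.mp ht' with h | h
            · exact hg _ _ h
            · rw [List.mem_singleton.mp h]
              exact hes [a, b] List.mem_cons_self b (by simp)
          · rw [PySem.Dict.getD_insert_of_ne _ _ _ hsa] at ht'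
            exact hg _ _ ht'
      | [] => exact ih _ _ _ (fun e' he' => hes e' (List.mem_cons_of_mem _ he')) hg s t ht
      | [a] => exact ih _ _ _ (fun e' he' => hes e' (List.mem_cons_of_mem _ he')) hg s t ht
      | a :: b :: c :: r => exact ih _ _ _ (fun e' he' => hes e' (List.mem_cons_of_mem _ he')) hg s t ht

lemma buildA_vals (edges : List (List Int)) (s t : Int) :
    t ∈ ((buildA edges).1.getD s []) → t ∈ edges.flatMap id := by
  intro ht
  refine foldA_vals edges _ _ _ ?_ ?_ s t ht
  · intro e he y hy; exact List.mem_flatMap.mpr ⟨e, he, hy⟩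
  · intro s' t' ht'; simp [PySem.Dict.getD_empty] at ht'

-- takeWhile over an append whose second part starts with a failing element (termination helper)
lemma takeWhile_append_len {α : Type} (p : α → Bool) (l₁ l₂ : List α)
    (h : ∀ x, l₂.head? = some x → p x = false) :
    ((l₁ ++ l₂).takeWhile p).length = (l₁.takeWhile p).length := by
  induction l₁ with
  | nil =>
      simp only [List.nil_append, List.takeWhile_nil]
      cases l₂ with
      | nil => rfl
      | cons x xs => simp [h x rfl]
  | cons a l₁ ih =>
      simp only [List.cons_append, List.takeWhile_cons]
      cases hp : p a <;> simp [ih]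

-- the BFS while-loop of A: pop s; nodes.add(s); flags; append unvisited successors.
-- hsucc / hq are totality bounds only (they make the measure well-founded); the computation is A's.
def bfsGo (succ : Int → List Int) (outd : Int → Int) (univ : Finset Int)
    (hsucc : ∀ s, ∀ t ∈ succ s, t ∈ univ)
    (nodes : PySem.Set Int) (q : List Int) (mak eig : Bool)
    (hq : ∀ x ∈ q, x ∈ univ) : PySem.Set Int × Bool × Bool :=
  match q with
  | [] => (nodes, mak, eig)
  | s :: rest =>
      bfsGo succ outd univ hsucc (PySem.Set.add nodes s)
        (rest ++ (succ s).filter (fun t => !(PySem.Set.contains (PySem.Set.add nodes s) t)))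
        (mak || (outd s == 0)) (eig || (outd s == 2))
        (fun x hx => (List.mem_append.mp hx).elim
          (fun h => hq x (List.mem_cons_of_mem _ h))
          (fun h => hsucc s x (List.mem_of_mem_filter h)))
termination_by ((univ.filter (fun x => x ∉ nodes)).card, (q.takeWhile (fun x => decide (x ∈ nodes))).length)
decreasing_by
  by_cases hs : s ∈ nodes
  · have hadd : PySem.Set.add nodes s = nodes := PySem.Set.add_of_mem hs
    rw [hadd]
    apply Prod.Lex.right
    have hhead : ∀ x, ((succ s).filter (fun t => !(PySem.Set.contains nodes t))).head? = some x →
        (fun x => decide (x ∈ nodes)) x = false := by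
      intro x hx
      have hxm := List.mem_of_mem_head? hx
      have hxf := List.of_mem_filter hxm
      simp only [Bool.not_eq_true'] at hxf
      have hxn : x ∉ nodes := fun hm => by
        rw [(PySem.Set.contains_iff nodes x).mpr hm] at hxf
        exact Bool.true_eq_false.mp hxf
      simp [hxn]
    rw [takeWhile_append_len _ _ _ hhead]
    simp only [List.takeWhile_cons, decide_eq_true_eq]
    rw [if_pos hs]
    simp
  · apply Prod.Lex.left
    apply Finset.card_lt_card
    constructor
    · intro x hx
      simp only [Finset.mem_filter] at *
      refine ⟨hx.1, fun hxn => hx.2 ?_⟩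
      exact (PySem.Set.mem_add _ _ _).mpr (Or.inl hxn)
    · intro hsub
      have hsu : s ∈ univ.filter (fun x => x ∉ nodes) := by
        simp only [Finset.mem_filter]
        exact ⟨hq s List.mem_cons_self, hs⟩
      have := hsub hsu
      simp only [Finset.mem_filter] at this
      exact this.2 ((PySem.Set.mem_add _ _ _).mpr (Or.inr rfl))

def solution (edges : List (List Int)) : List Int :=
  let b := buildA edges
  let graph := b.1
  let indec := b.2.1
  let outdec := b.2.2
  let start := graph.keys.foldl
    (fun st nxt => if indec.getD nxt 0 = 0 ∧ 2 ≤ outdec.getD nxt 0 then nxt else st) 0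
  let univ : Finset Int := (edges.flatMap id).toFinset
  let c := (graph.getD start []).attach.foldl
    (fun (c : Int × Int × Int) n =>
      let r := bfsGo (fun s => graph.getD s []) (fun s => outdec.getD s 0) univ
        (fun s t ht => List.mem_toFinset.mpr (buildA_vals edges s t ht))
        PySem.Set.empty [n.1] false false
        (fun x hx => List.mem_toFinset.mpr (buildA_vals edges start x (List.mem_singleton.mp hx ▸ n.2)))
      if r.2.1 = true then (c.1, c.2.1 + 1, c.2.2)
      else if r.2.2 = true then (c.1, c.2.1, c.2.2 + 1)
      else (c.1 + 1, c.2.1, c.2.2))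
    (0, 0, 0)
  [start, c.1, c.2.1, c.2.2]

-- ===== PORT B =====
-- one edge [a, b]: succ.setdefault(a, []).append(b); targets.add(b)
def stepB (st : PySem.Dict Int (List Int) × PySem.Set Int) (e : List Int) :
    PySem.Dict Int (List Int) × PySem.Set Int :=
  match e with
  | [a, b] => (st.1.insert a (st.1.getD a [] ++ [b]), PySem.Set.add st.2 b)
  | _ => st  -- unreachable under Pre_solution

def buildB (edges : List (List Int)) : PySem.Dict Int (List Int) × PySem.Set Int :=
  edges.foldl stepB (PySem.Dict.empty, PySem.Set.empty)

lemma foldB_vals {U : List Int} : ∀ (es : List (List Int)) (g : PySem.Dict Int (List Int)) (t0 : PySem.Set Int),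
    (∀ e ∈ es, ∀ y ∈ e, y ∈ U) → (∀ s t, t ∈ g.getD s [] → t ∈ U) →
    ∀ s t, t ∈ ((es.foldl stepB (g, t0)).1.getD s []) → t ∈ U := by
  intro es
  induction es with
  | nil => intro g t0 _ hg s t ht; exact hg s t ht
  | cons e es ih =>
      intro g t0 hes hg s t ht
      simp only [List.foldl_cons] at ht
      match e with
      | [a, b] =>
          refine ih _ _ (fun e' he' => hes e' (List.mem_cons_of_mem _ he')) ?_ s t ht
          intro s' t' ht'
          by_cases hsa : s' = a
          · rw [hsa, PySem.Dict.getD_insert_self] at ht'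
            rcases List.mem_append.mp ht' with h | h
            · exact hg _ _ h
            · rw [List.mem_singleton.mp h]
              exact hes [a, b] List.mem_cons_self b (by simp)
          · rw [PySem.Dict.getD_insert_of_ne _ _ _ hsa] at ht'
            exact hg _ _ ht'
      | [] => exact ih _ _ (fun e' he' => hes e' (List.mem_cons_of_mem _ he')) hg s t ht
      | [a] => exact ih _ _ (fun e' he' => hes e' (List.mem_cons_of_mem _ he')) hg s t ht
      | a :: b :: c :: r => exact ih _ _ (fun e' he' => hes e' (List.mem_cons_of_mem _ he')) hg s t ht

lemma buildB_vals (edges : List (List Int)) (s t : Int) :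
    t ∈ ((buildB edges).1.getD s []) → t ∈ edges.flatMap id := by
  intro ht
  refine foldB_vals edges _ _ ?_ ?_ s t ht
  · intro e he y hy; exact List.mem_flatMap.mpr ⟨e, he, hy⟩
  · intro s' t' ht'; simp [PySem.Dict.getD_empty] at ht'

-- one inner step of B's saturation pass: if w not in reach: reach.add(w); changed = True
def satAdd (rc : PySem.Set Int × Bool) (w : Int) : PySem.Set Int × Bool :=
  if PySem.Set.contains rc.1 w then rc else (PySem.Set.add rc.1 w, true)

-- one pass: for v in list(reach): for w in succ(v): satAdd
def satPass (succ : Int → List Int) (reach : PySem.Set Int) : PySem.Set Int × Bool :=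
  reach.foldl (fun rc v => (succ v).foldl satAdd rc) (reach, false)

lemma satAdd_foldl_sub (ws : List Int) : ∀ (rc : PySem.Set Int × Bool), ∀ x ∈ rc.1, x ∈ (ws.foldl satAdd rc).1 := by
  induction ws with
  | nil => intro rc x hx; exact hx
  | cons w ws ih =>
      intro rc x hx
      simp only [List.foldl_cons]
      refine ih _ x ?_
      unfold satAdd
      split
      · exact hx
      · exact (PySem.Set.mem_add _ _ _).mpr (Or.inl hx)

lemma satAdd_foldl_mem (ws : List Int) : ∀ (rc : PySem.Set Int × Bool), ∀ x ∈ (ws.foldl satAdd rc).1, x ∈ rc.1 ∨ x ∈ ws := by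
  induction ws with
  | nil => intro rc x hx; exact Or.inl hx
  | cons w ws ih =>
      intro rc x hx
      simp only [List.foldl_cons] at hx
      rcases ih _ x hx with h | h
      · unfold satAdd at h
        split at h
        · exact Or.inl h
        · rcases (PySem.Set.mem_add _ _ _).mp h with h' | h'
          · exact Or.inl h'
          · exact Or.inr (h' ▸ List.mem_cons_self)
      · exact Or.inr (List.mem_cons_of_mem _ h)

lemma satAdd_foldl_nodup (ws : List Int) : ∀ (rc : PySem.Set Int × Bool), rc.1.Nodup → (ws.foldl satAdd rc).1.Nodup := by
  induction ws with
  | nil => intro rc h; exact h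
  | cons w ws ih =>
      intro rc h
      simp only [List.foldl_cons]
      refine ih _ ?_
      unfold satAdd
      split
      · exact h
      · exact PySem.Set.nodup_add _ _ h

lemma satAdd_foldl_len (ws : List Int) : ∀ (rc : PySem.Set Int × Bool), rc.1.length ≤ (ws.foldl satAdd rc).1.length := by
  induction ws with
  | nil => intro rc; exact le_refl _
  | cons w ws ih =>
      intro rc
      simp only [List.foldl_cons]
      refine le_trans ?_ (ih (satAdd rc w))
      by_cases hc : PySem.Set.contains rc.1 w = true
      · simp [satAdd, (PySem.Set.contains_iff _ _).mp hc]
      · have hw : w ∉ rc.1 := fun hm => hc ((PySem.Set.contains_iff _ _).mpr hm)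
        simp [satAdd, hw]

lemma satAdd_foldl_flag (ws : List Int) : ∀ (rc : PySem.Set Int × Bool),
    (ws.foldl satAdd rc).2 = true → rc.2 = true ∨ rc.1.length < (ws.foldl satAdd rc).1.length := by
  induction ws with
  | nil => intro rc h; exact Or.inl h
  | cons w ws ih =>
      intro rc h
      simp only [List.foldl_cons] at h ⊢
      by_cases hc : PySem.Set.contains rc.1 w = true
      · have hsa : satAdd rc w = rc := by simp [satAdd, (PySem.Set.contains_iff _ _).mp hc]
        rw [hsa] at h ⊢
        exact ih rc h
      · right
        have hw : w ∉ rc.1 := fun hm => hc ((PySem.Set.contains_iff _ _).mpr hm)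
        have hsa : satAdd rc w = (rc.1 ++ [w], true) := by
          simp [satAdd, hw]
        rw [hsa]
        refine lt_of_lt_of_le (by simp) (satAdd_foldl_len ws (rc.1 ++ [w], true))

lemma satPassOuter_sub (succ : Int → List Int) (vs : List Int) :
    ∀ (rc : PySem.Set Int × Bool), ∀ x ∈ rc.1, x ∈ ((vs.foldl (fun rc v => (succ v).foldl satAdd rc) rc).1) := by
  induction vs with
  | nil => intro rc x hx; exact hx
  | cons v vs ih =>
      intro rc x hx
      simp only [List.foldl_cons]
      exact ih _ x (satAdd_foldl_sub _ _ x hx)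

lemma satPassOuter_mem (succ : Int → List Int) (vs : List Int) :
    ∀ (rc : PySem.Set Int × Bool), ∀ x ∈ ((vs.foldl (fun rc v => (succ v).foldl satAdd rc) rc).1),
      x ∈ rc.1 ∨ ∃ v, x ∈ succ v := by
  induction vs with
  | nil => intro rc x hx; exact Or.inl hx
  | cons v vs ih =>
      intro rc x hx
      simp only [List.foldl_cons] at hx
      rcases ih _ x hx with h | h
      · rcases satAdd_foldl_mem _ _ x h with h' | h'
        · exact Or.inl h'
        · exact Or.inr ⟨v, h'⟩
      · exact Or.inr h

lemma satPassOuter_nodup (succ : Int → List Int) (vs : List Int) :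
    ∀ (rc : PySem.Set Int × Bool), rc.1.Nodup → ((vs.foldl (fun rc v => (succ v).foldl satAdd rc) rc).1).Nodup := by
  induction vs with
  | nil => intro rc h; exact h
  | cons v vs ih =>
      intro rc h
      simp only [List.foldl_cons]
      exact ih _ (satAdd_foldl_nodup _ _ h)

lemma satPassOuter_len (succ : Int → List Int) (vs : List Int) :
    ∀ (rc : PySem.Set Int × Bool), rc.1.length ≤ ((vs.foldl (fun rc v => (succ v).foldl satAdd rc) rc).1).length := by
  induction vs with
  | nil => intro rc; exact le_refl _
  | cons v vs ih =>
      intro rc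
      simp only [List.foldl_cons]
      exact le_trans (satAdd_foldl_len _ _) (ih _)

lemma satPassOuter_flag (succ : Int → List Int) (vs : List Int) :
    ∀ (rc : PySem.Set Int × Bool), ((vs.foldl (fun rc v => (succ v).foldl satAdd rc) rc).2) = true →
      rc.2 = true ∨ rc.1.length < ((vs.foldl (fun rc v => (succ v).foldl satAdd rc) rc).1).length := by
  induction vs with
  | nil => intro rc h; exact Or.inl h
  | cons v vs ih =>
      intro rc h
      simp only [List.foldl_cons] at h ⊢
      rcases ih _ h with h' | h'
      · rcases satAdd_foldl_flag _ _ h' with h'' | h''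
        · exact Or.inl h''
        · exact Or.inr (lt_of_lt_of_le h'' (satPassOuter_len succ vs _))
      · exact Or.inr (lt_of_le_of_lt (satAdd_foldl_len _ _) h')

-- B's while-changed loop: repeat passes until a pass adds nothing
def satGo (succ : Int → List Int) (univ : Finset Int)
    (hsucc : ∀ s, ∀ t ∈ succ s, t ∈ univ)
    (reach : PySem.Set Int) (hr : ∀ x ∈ reach, x ∈ univ) (hnd : reach.Nodup) : PySem.Set Int :=
  let p := satPass succ reach
  if hp : p.2 = true then
    satGo succ univ hsucc p.1
      (fun x hx => (satPassOuter_mem succ reach _ x hx).elim (fun h => hr x h) (fun ⟨v, hv⟩ => hsucc v x hv))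
      (satPassOuter_nodup succ reach _ hnd)
  else p.1
termination_by (univ.filter (fun x => x ∉ reach)).card
decreasing_by
  simp only [satPass] at hp ⊢
  apply Finset.card_lt_card
  constructor
  · intro x hx
    simp only [Finset.mem_filter] at *
    exact ⟨hx.1, fun hxr => hx.2 (satPassOuter_sub succ reach _ x hxr)⟩
  · intro hsub
    have hlen : reach.length <
        ((reach.foldl (fun rc v => (succ v).foldl satAdd rc) ((reach, false) : PySem.Set Int × Bool)).1).length := by
      rcases satPassOuter_flag succ reach (reach, false) hp with h | h
      · simp at h
      · exact h
    have hsubset : ((reach.foldl (fun rc v => (succ v).foldl satAdd rc) ((reach, false) : PySem.Set Int × Bool)).1) ⊆ reach := by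
      intro x hx
      by_contra hxr
      have hxu : x ∈ univ := (satPassOuter_mem succ reach _ x hx).elim (fun h => hr x h) (fun hv => hsucc hv.choose x hv.choose_spec)
      have hmem := hsub (Finset.mem_filter.mpr ⟨hxu, hxr⟩)
      exact (Finset.mem_filter.mp hmem).2 hx
    have hle := (List.subperm_of_subset (satPassOuter_nodup succ reach (reach, false) hnd) hsubset).length_le
    omega

def solution_alt (edges : List (List Int)) : List Int :=
  let b := buildB edges
  let succ := b.1
  let targets := b.2
  let start := succ.keys.foldl
    (fun st v => if ¬ (PySem.Set.contains targets v = true) ∧ 2 ≤ PySem.List.len (succ.getD v []) then v else st) 0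
  let univ : Finset Int := (edges.flatMap id).toFinset
  let c := (succ.getD start []).attach.foldl
    (fun (c : Int × Int × Int) n =>
      let r := satGo (fun s => succ.getD s []) univ
        (fun s t ht => List.mem_toFinset.mpr (buildB_vals edges s t ht))
        (PySem.Set.ofList [n.1])
        (fun x hx => List.mem_toFinset.mpr (buildB_vals edges start x
          (List.mem_singleton.mp ((PySem.Set.mem_ofList _ _).mp hx) ▸ n.2)))
        (PySem.Set.nodup_ofList _)
      if r.any (fun v => PySem.List.len (succ.getD v []) == 0) then (c.1, c.2.1 + 1, c.2.2)
      else if r.any (fun v => PySem.List.len (succ.getD v []) == 2) then (c.1, c.2.1, c.2.2 + 1)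
      else (c.1 + 1, c.2.1, c.2.2))
    (0, 0, 0)
  [start, c.1, c.2.1, c.2.2]

-- ===== PRECONDITION & SPEC =====
-- Pre_ excludes exactly the rows that are not two-element lists, on which Python's
-- 'for a, b in edges' raises ValueError/TypeError before anything is returned.
def Pre_solution (edges : List (List Int)) : Prop := ∀ e ∈ edges, e.length = 2
instance (edges : List (List Int)) : Decidable (Pre_solution edges) := by unfold Pre_solution; infer_instance

def pvWitness_solution : List (List Int) := [[4, 1], [1, 2], [2, 3], [3, 1], [4, 5], [5, 6]]

def Spec_solution (edges : List (List Int)) (out : List Int) : Prop := out = solution_alt edges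
instance (edges : List (List Int)) (out : List Int) : Decidable (Spec_solution edges out) := by unfold Spec_solution; infer_instance

-- ===== CLAIM (what is proved, stated in full; the proofs are below) =====
def Claim_equal_solution : Prop := ∀ (edges : List (List Int)), Dom_solution edges → Pre_solution edges → Spec_solution edges (solution edges)

-- ===== LEMMAS AND PROOFS =====

-- auxiliary facts about one saturation pass (B side), and the correctness of both loops

lemma satPassOuter_mem2 (succ : Int → List Int) (vs : List Int) :
    ∀ (rc : PySem.Set Int × Bool), ∀ x ∈ ((vs.foldl (fun rc v => (succ v).foldl satAdd rc) rc).1),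
      x ∈ rc.1 ∨ ∃ v ∈ vs, x ∈ succ v := by
  induction vs with
  | nil => intro rc x hx; exact Or.inl hx
  | cons v vs ih =>
      intro rc x hx
      simp only [List.foldl_cons] at hx
      rcases ih _ x hx with h | h
      · rcases satAdd_foldl_mem _ _ x h with h' | h'
        · exact Or.inl h'
        · exact Or.inr ⟨v, List.mem_cons_self, h'⟩
      · rcases h with ⟨v', hv', hx'⟩
        exact Or.inr ⟨v', List.mem_cons_of_mem _ hv', hx'⟩

lemma satAdd_foldl_mem_final (ws : List Int) : ∀ (rc : PySem.Set Int × Bool), ∀ w ∈ ws, w ∈ (ws.foldl satAdd rc).1 := by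
  induction ws with
  | nil => intro rc w hw; simp at hw
  | cons w' ws ih =>
      intro rc w hw
      simp only [List.foldl_cons]
      rcases List.mem_cons.mp hw with he | hm
      · subst he
        refine satAdd_foldl_sub ws (satAdd rc w) w ?_
        by_cases hc : PySem.Set.contains rc.1 w = true
        · have hcm := (PySem.Set.contains_iff _ _).mp hc
          simp [satAdd, hcm]
        · have hwn : w ∉ rc.1 := fun hm' => hc ((PySem.Set.contains_iff _ _).mpr hm')
          simp [satAdd, hwn]
      · exact ih _ w hm

lemma satPassOuter_succ_mem (succ : Int → List Int) (vs : List Int) :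
    ∀ (rc : PySem.Set Int × Bool), ∀ v ∈ vs, ∀ w ∈ succ v,
      w ∈ ((vs.foldl (fun rc v => (succ v).foldl satAdd rc) rc).1) := by
  induction vs with
  | nil => intro rc v hv; simp at hv
  | cons v' vs ih =>
      intro rc v hv w hw
      simp only [List.foldl_cons]
      rcases List.mem_cons.mp hv with he | hm
      · subst he
        exact satPassOuter_sub succ vs _ w (satAdd_foldl_mem_final _ _ w hw)
      · exact ih _ v hm w hw

lemma satAdd_foldl_flag_mono (ws : List Int) : ∀ (rc : PySem.Set Int × Bool), rc.2 = true → (ws.foldl satAdd rc).2 = true := by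
  induction ws with
  | nil => intro rc h; exact h
  | cons w ws ih =>
      intro rc h
      simp only [List.foldl_cons]
      refine ih _ ?_
      unfold satAdd
      split
      · exact h
      · rfl

lemma satAdd_foldl_eq_of_false (ws : List Int) : ∀ (rc : PySem.Set Int × Bool),
    (ws.foldl satAdd rc).2 = false → ws.foldl satAdd rc = rc := by
  induction ws with
  | nil => intro rc _; rfl
  | cons w ws ih =>
      intro rc h
      simp only [List.foldl_cons] at h ⊢
      by_cases hc : PySem.Set.contains rc.1 w = true
      · have hsa : satAdd rc w = rc := by simp [satAdd, (PySem.Set.contains_iff _ _).mp hc]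
        rw [hsa] at h ⊢
        exact ih rc h
      · exfalso
        have hwn : w ∉ rc.1 := fun hm => hc ((PySem.Set.contains_iff _ _).mpr hm)
        have hsa : satAdd rc w = (rc.1 ++ [w], true) := by simp [satAdd, hwn]
        rw [hsa] at h
        rw [satAdd_foldl_flag_mono ws _ rfl] at h
        exact Bool.true_eq_false.mp h

lemma satPassOuter_flag_mono (succ : Int → List Int) (vs : List Int) :
    ∀ (rc : PySem.Set Int × Bool), rc.2 = true →
      ((vs.foldl (fun rc v => (succ v).foldl satAdd rc) rc).2) = true := by
  induction vs with
  | nil => intro rc h; exact h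
  | cons v vs ih =>
      intro rc h
      simp only [List.foldl_cons]
      exact ih _ (satAdd_foldl_flag_mono _ _ h)

lemma satPassOuter_eq_of_false (succ : Int → List Int) (vs : List Int) :
    ∀ (rc : PySem.Set Int × Bool),
      ((vs.foldl (fun rc v => (succ v).foldl satAdd rc) rc).2) = false →
      vs.foldl (fun rc v => (succ v).foldl satAdd rc) rc = rc := by
  induction vs with
  | nil => intro rc _; rfl
  | cons v vs ih =>
      intro rc h
      simp only [List.foldl_cons] at h ⊢
      by_cases hf : ((succ v).foldl satAdd rc).2 = true
      · exfalso
        rw [satPassOuter_flag_mono succ vs _ hf] at h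
        exact Bool.true_eq_false.mp h
      · have h0 : ((succ v).foldl satAdd rc).2 = false := Bool.eq_false_iff.mpr hf
        have he := satAdd_foldl_eq_of_false (succ v) rc h0
        rw [he] at h ⊢
        exact ih rc h

-- satGo computes: a superset of reach, closed under succ, and minimal among such
lemma satGo_spec (succ : Int → List Int) (univ : Finset Int) (hsucc : ∀ s, ∀ t ∈ succ s, t ∈ univ) :
    ∀ (reach : PySem.Set Int) (hr : ∀ x ∈ reach, x ∈ univ) (hnd : reach.Nodup),
    (∀ x ∈ reach, x ∈ satGo succ univ hsucc reach hr hnd) ∧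
    (∀ v ∈ satGo succ univ hsucc reach hr hnd, ∀ w ∈ succ v, w ∈ satGo succ univ hsucc reach hr hnd) ∧
    (∀ C : Int → Prop, (∀ v, C v → ∀ w ∈ succ v, C w) → (∀ x ∈ reach, C x) →
      ∀ x ∈ satGo succ univ hsucc reach hr hnd, C x) := by
  intro reach hr hnd
  fun_induction satGo succ univ hsucc reach hr hnd with
  | case1 reach hr hnd p hp ih =>
      obtain ⟨isub, icl, imin⟩ := ih
      refine ⟨?_, icl, ?_⟩
      · intro x hx
        exact isub x (satPassOuter_sub succ reach _ x hx)
      · intro C hC hreach x hx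
        refine imin C hC ?_ x hx
        intro y hy
        rcases satPassOuter_mem2 succ reach _ y hy with h | ⟨v, hv, hyv⟩
        · exact hreach y h
        · exact hC v (hreach v hv) y hyv
  | case2 reach hr hnd p hp =>
      have hp2 : p.2 = false := by
        cases h2 : p.2 with
        | false => rfl
        | true => exact absurd h2 hp
      have hfalse : ((reach.foldl (fun rc v => (succ v).foldl satAdd rc) ((reach, false) : PySem.Set Int × Bool)).2) = false := hp2
      have heq := satPassOuter_eq_of_false succ reach ((reach, false) : PySem.Set Int × Bool) hfalse
      have hp1 : p.1 = reach := by
        show ((satPass succ reach).1) = reach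
        unfold satPass
        rw [heq]
      refine ⟨?_, ?_, ?_⟩
      · intro x hx; rw [hp1]; exact hx
      · intro v hv w hw
        rw [hp1] at hv ⊢
        have := satPassOuter_succ_mem succ reach ((reach, false) : PySem.Set Int × Bool) v hv w hw
        rw [heq] at this
        exact this
      · intro C hC hreach x hx
        rw [hp1] at hx
        exact hreach x hx

-- bfsGo computes: all of nodes ∪ q, closed under succ (given the closure invariant), minimal,
-- and its two flags say "some collected node has outd 0 / 2"
lemma bfsGo_spec (succ : Int → List Int) (outd : Int → Int) (univ : Finset Int)
    (hsucc : ∀ s, ∀ t ∈ succ s, t ∈ univ) :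
    ∀ (nodes : PySem.Set Int) (q : List Int) (mak eig : Bool) (hq : ∀ x ∈ q, x ∈ univ),
    (∀ s ∈ nodes, ∀ t ∈ succ s, t ∈ nodes ∨ t ∈ q) →
    (∀ s ∈ nodes, outd s = 0 → mak = true) →
    (∀ s ∈ nodes, outd s = 2 → eig = true) →
    (∀ x, (x ∈ nodes ∨ x ∈ q) → x ∈ (bfsGo succ outd univ hsucc nodes q mak eig hq).1) ∧
    (∀ v ∈ (bfsGo succ outd univ hsucc nodes q mak eig hq).1, ∀ t ∈ succ v,
      t ∈ (bfsGo succ outd univ hsucc nodes q mak eig hq).1) ∧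
    (∀ C : Int → Prop, (∀ v, C v → ∀ t ∈ succ v, C t) → (∀ x ∈ nodes, C x) → (∀ x ∈ q, C x) →
      ∀ x ∈ (bfsGo succ outd univ hsucc nodes q mak eig hq).1, C x) ∧
    ((bfsGo succ outd univ hsucc nodes q mak eig hq).2.1 = true ↔
      mak = true ∨ ∃ s ∈ (bfsGo succ outd univ hsucc nodes q mak eig hq).1, outd s = 0) ∧
    ((bfsGo succ outd univ hsucc nodes q mak eig hq).2.2 = true ↔
      eig = true ∨ ∃ s ∈ (bfsGo succ outd univ hsucc nodes q mak eig hq).1, outd s = 2) := by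
  intro nodes q mak eig hq
  fun_induction bfsGo succ outd univ hsucc nodes q mak eig hq with
  | case1 nodes mak eig hq1 hq2 =>
      intro h1 h2 h3
      refine ⟨?_, ?_, ?_, ?_, ?_⟩
      · intro x hx
        rcases hx with h | h
        · exact h
        · simp at h
      · intro v hv t ht
        rcases h1 v hv t ht with h | h
        · exact h
        · simp at h
      · intro C hC hn hq' x hx; exact hn x hx
      · constructor
        · intro hm; exact Or.inl hm
        · rintro (hm | ⟨s, hs, h0⟩)
          · exact hm
          · exact h2 s hs h0
      · constructor
        · intro hm; exact Or.inl hm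
        · rintro (hm | ⟨s, hs, h0⟩)
          · exact hm
          · exact h3 s hs h0
  | case2 nodes mak eig s rest hq1 hq2 ih =>
      intro h1 h2 h3
      have h1' : ∀ s' ∈ PySem.Set.add nodes s, ∀ t ∈ succ s',
          t ∈ PySem.Set.add nodes s ∨
          t ∈ rest ++ (succ s).filter (fun t => !(PySem.Set.contains (PySem.Set.add nodes s) t)) := by
        intro s' hs' t htv
        rcases (PySem.Set.mem_add _ _ _).mp hs' with hsn | hse
        · rcases h1 s' hsn t htv with hn | hqq
          · exact Or.inl ((PySem.Set.mem_add _ _ _).mpr (Or.inl hn))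
          · rcases List.mem_cons.mp hqq with he | hr2
            · exact Or.inl (by rw [he]; exact (PySem.Set.mem_add _ _ _).mpr (Or.inr rfl))
            · exact Or.inr (List.mem_append_left _ hr2)
        · by_cases htn : t ∈ PySem.Set.add nodes s
          · exact Or.inl htn
          · refine Or.inr (List.mem_append_right _ ?_)
            refine List.mem_filter.mpr ⟨hse ▸ htv, ?_⟩
            cases hcc : PySem.Set.contains (PySem.Set.add nodes s) t
            · rfl
            · exact absurd ((PySem.Set.contains_iff _ _).mp hcc) htn
      have h2' : ∀ s' ∈ PySem.Set.add nodes s, outd s' = 0 → (mak || (outd s == 0)) = true := by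
        intro s' hs' h0
        rcases (PySem.Set.mem_add _ _ _).mp hs' with hsn | hse
        · rw [h2 s' hsn h0]; rfl
        · subst hse; simp [h0]
      have h3' : ∀ s' ∈ PySem.Set.add nodes s, outd s' = 2 → (eig || (outd s == 2)) = true := by
        intro s' hs' h0
        rcases (PySem.Set.mem_add _ _ _).mp hs' with hsn | hse
        · rw [h3 s' hsn h0]; rfl
        · subst hse; simp [h0]
      obtain ⟨isub, icl, imin, imak, ieig⟩ := ih h1' h2' h3'
      refine ⟨?_, icl, ?_, ?_, ?_⟩
      · intro x hx
        rcases hx with h | h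
        · exact isub x (Or.inl ((PySem.Set.mem_add _ _ _).mpr (Or.inl h)))
        · rcases List.mem_cons.mp h with he | hm
          · exact isub x (Or.inl (by rw [he]; exact (PySem.Set.mem_add _ _ _).mpr (Or.inr rfl)))
          · exact isub x (Or.inr (List.mem_append_left _ hm))
      · intro C hC hn hq' x hx
        refine imin C hC ?_ ?_ x hx
        · intro y hy
          rcases (PySem.Set.mem_add _ _ _).mp hy with hyn | hye
          · exact hn y hyn
          · rw [hye]; exact hq' s List.mem_cons_self
        · intro y hy
          rcases List.mem_append.mp hy with hym | hyf
          · exact hq' y (List.mem_cons_of_mem _ hym)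
          · exact hC s (hq' s List.mem_cons_self) y (List.mem_of_mem_filter hyf)
      · rw [imak, Bool.or_eq_true, beq_iff_eq]
        constructor
        · rintro ((hm | h0) | hex)
          · exact Or.inl hm
          · exact Or.inr ⟨s, isub s (Or.inl ((PySem.Set.mem_add _ _ _).mpr (Or.inr rfl))), h0⟩
          · exact Or.inr hex
        · rintro (hm | hex)
          · exact Or.inl (Or.inl hm)
          · exact Or.inr hex
      · rw [ieig, Bool.or_eq_true, beq_iff_eq]
        constructor
        · rintro ((hm | h0) | hex)
          · exact Or.inl hm
          · exact Or.inr ⟨s, isub s (Or.inl ((PySem.Set.mem_add _ _ _).mpr (Or.inr rfl))), h0⟩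
          · exact Or.inr hex
        · rintro (hm | hex)
          · exact Or.inl (Or.inl hm)
          · exact Or.inr hex

-- building the dictionaries: graphs agree, in-degree 0 ↔ never a target, out-degree = successor-list length
lemma build_inv : ∀ (es : List (List Int)) (g : PySem.Dict Int (List Int)) (i o : PySem.Dict Int Int) (tg : PySem.Set Int),
    (∀ x : Int, 0 ≤ i.getD x 0) →
    (∀ x : Int, i.getD x 0 = 0 ↔ x ∉ tg) →
    (∀ x : Int, o.getD x 0 = ((g.getD x []).length : Int)) →
    (es.foldl stepA (g, i, o)).1 = (es.foldl stepB (g, tg)).1 ∧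
    (∀ x : Int, 0 ≤ (es.foldl stepA (g, i, o)).2.1.getD x 0) ∧
    (∀ x : Int, (es.foldl stepA (g, i, o)).2.1.getD x 0 = 0 ↔ x ∉ (es.foldl stepB (g, tg)).2) ∧
    (∀ x : Int, (es.foldl stepA (g, i, o)).2.2.getD x 0 = (((es.foldl stepA (g, i, o)).1.getD x []).length : Int)) := by
  intro es
  induction es with
  | nil => intro g i o tg h0 h1 h2; exact ⟨rfl, h0, h1, h2⟩
  | cons e es ih =>
      intro g i o tg h0 h1 h2
      simp only [List.foldl_cons]
      match e with
      | [] => exact ih g i o tg h0 h1 h2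
      | [a] => exact ih g i o tg h0 h1 h2
      | a :: b :: c :: r => exact ih g i o tg h0 h1 h2
      | [a, b] =>
          simp only [stepA, stepB]
          refine ih _ _ _ _ ?_ ?_ ?_
          · intro x
            by_cases hxb : x = b
            · rw [hxb, PySem.Dict.getD_insert_self]
              have := h0 b; omega
            · rw [PySem.Dict.getD_insert_of_ne _ _ _ hxb]; exact h0 x
          · intro x
            by_cases hxb : x = b
            · rw [hxb, PySem.Dict.getD_insert_self]
              constructor
              · intro h; exfalso; have := h0 b; omega
              · intro h; exfalso; exact h ((PySem.Set.mem_add _ _ _).mpr (Or.inr rfl))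
            · rw [PySem.Dict.getD_insert_of_ne _ _ _ hxb, h1 x]
              constructor
              · intro h hm; exact h (((PySem.Set.mem_add _ _ _).mp hm).resolve_right hxb)
              · intro h hm; exact h ((PySem.Set.mem_add _ _ _).mpr (Or.inl hm))
          · intro x
            by_cases hxa : x = a
            · rw [hxa, PySem.Dict.getD_insert_self, PySem.Dict.getD_insert_self, h2 a]
              simp only [List.length_append, List.length_cons, List.length_nil]
              push_cast
              omega
            · rw [PySem.Dict.getD_insert_of_ne _ _ _ hxa, PySem.Dict.getD_insert_of_ne _ _ _ hxa]
              exact h2 x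

lemma buildAB (edges : List (List Int)) :
    (buildA edges).1 = (buildB edges).1 ∧
    (∀ x : Int, (buildA edges).2.1.getD x 0 = 0 ↔ x ∉ (buildB edges).2) ∧
    (∀ x : Int, (buildA edges).2.2.getD x 0 = (((buildA edges).1.getD x []).length : Int)) := by
  have h := build_inv edges PySem.Dict.empty PySem.Dict.empty PySem.Dict.empty PySem.Set.empty
    (fun x => by simp [PySem.Dict.getD_empty])
    (fun x => by simp [PySem.Dict.getD_empty, PySem.Set.empty])
    (fun x => by simp [PySem.Dict.getD_empty])
  exact ⟨h.1, h.2.2.1, h.2.2.2⟩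

-- fold over .attach of equal lists with element-wise equal bodies
lemma attach_foldl_eq {β : Type} (L L' : List Int) (h : L = L')
    (F : β → {x // x ∈ L} → β) (G : β → {x // x ∈ L'} → β) (init : β)
    (hFG : ∀ acc (x : Int) (hx : x ∈ L) (hx' : x ∈ L'), F acc ⟨x, hx⟩ = G acc ⟨x, hx'⟩) :
    L.attach.foldl F init = L'.attach.foldl G init := by
  subst h
  refine PySem.List.foldl_congr_mem _ _ _ _ ?_
  intro acc x hx
  exact hFG acc x.1 x.2 x.2

-- per start-successor: A's BFS flags agree with B's saturated-set any-tests
lemma component_classify (succA succB : Int → List Int) (hsAB : succA = succB)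
    (outd : Int → Int) (univ : Finset Int)
    (hsuccA : ∀ s, ∀ t ∈ succA s, t ∈ univ) (hsuccB : ∀ s, ∀ t ∈ succB s, t ∈ univ)
    (houtd : ∀ v, outd v = ((succA v).length : Int))
    (n : Int) (hq : ∀ x ∈ [n], x ∈ univ)
    (hr : ∀ x ∈ PySem.Set.ofList [n], x ∈ univ) (hnd : (PySem.Set.ofList [n]).Nodup) :
    ((bfsGo succA outd univ hsuccA PySem.Set.empty [n] false false hq).2.1 = true ↔
      (satGo succB univ hsuccB (PySem.Set.ofList [n]) hr hnd).any
        (fun v => PySem.List.len (succB v) == 0) = true) ∧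
    ((bfsGo succA outd univ hsuccA PySem.Set.empty [n] false false hq).2.2 = true ↔
      (satGo succB univ hsuccB (PySem.Set.ofList [n]) hr hnd).any
        (fun v => PySem.List.len (succB v) == 2) = true) := by
  subst hsAB
  obtain ⟨bsub, bcl, bmin, bmak, beig⟩ := bfsGo_spec succA outd univ hsuccA PySem.Set.empty [n] false false hq
    (by intro s hs; simp [PySem.Set.empty] at hs)
    (by intro s hs; simp [PySem.Set.empty] at hs)
    (by intro s hs; simp [PySem.Set.empty] at hs)
  obtain ⟨ssub, scl, smin⟩ := satGo_spec succA univ hsuccB (PySem.Set.ofList [n]) hr hnd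
  have hmemeq : ∀ x, x ∈ (bfsGo succA outd univ hsuccA PySem.Set.empty [n] false false hq).1 ↔
      x ∈ satGo succA univ hsuccB (PySem.Set.ofList [n]) hr hnd := by
    intro x
    constructor
    · intro hx
      refine bmin (fun y => y ∈ satGo succA univ hsuccB (PySem.Set.ofList [n]) hr hnd)
        (fun v hv w hw => scl v hv w hw) ?_ ?_ x hx
      · intro y hy; simp [PySem.Set.empty] at hy
      · intro y hy
        rw [List.mem_singleton.mp hy]
        exact ssub n ((PySem.Set.mem_ofList _ _).mpr (List.mem_singleton_self n))
    · intro hx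
      refine smin (fun y => y ∈ (bfsGo succA outd univ hsuccA PySem.Set.empty [n] false false hq).1)
        (fun v hv w hw => bcl v hv w hw) ?_ x hx
      intro y hy
      rw [List.mem_singleton.mp ((PySem.Set.mem_ofList _ _).mp hy)]
      exact bsub n (Or.inr (List.mem_singleton_self n))
  constructor
  · rw [bmak]
    simp only [Bool.false_eq_true, false_or]
    rw [List.any_eq_true]
    constructor
    · rintro ⟨s, hs, h0⟩
      refine ⟨s, (hmemeq s).mp hs, ?_⟩
      rw [beq_iff_eq, PySem.List.len_eq, ← houtd s]
      exact h0
    · rintro ⟨v, hv, hb⟩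
      refine ⟨v, (hmemeq v).mpr hv, ?_⟩
      rw [beq_iff_eq, PySem.List.len_eq] at hb
      rw [houtd v]
      exact hb
  · rw [beig]
    simp only [Bool.false_eq_true, false_or]
    rw [List.any_eq_true]
    constructor
    · rintro ⟨s, hs, h0⟩
      refine ⟨s, (hmemeq s).mp hs, ?_⟩
      rw [beq_iff_eq, PySem.List.len_eq, ← houtd s]
      exact h0
    · rintro ⟨v, hv, hb⟩
      refine ⟨v, (hmemeq v).mpr hv, ?_⟩
      rw [beq_iff_eq, PySem.List.len_eq] at hb
      rw [houtd v]
      exact hb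

-- ===== VERDICT (by name: the statement is the Claim_ definition above) =====
theorem solution_spec : Claim_equal_solution := by
  intro edges _hdom _hpre
  unfold Spec_solution
  obtain ⟨hg, hin, hout⟩ := buildAB edges
  simp only [solution, solution_alt]
  have hstart :
      (buildA edges).1.keys.foldl
        (fun st nxt => if (buildA edges).2.1.getD nxt 0 = 0 ∧ 2 ≤ (buildA edges).2.2.getD nxt 0 then nxt else st) 0 =
      (buildB edges).1.keys.foldl
        (fun st v => if ¬ (PySem.Set.contains (buildB edges).2 v = true) ∧ 2 ≤ PySem.List.len ((buildB edges).1.getD v []) then v else st) 0 := by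
    rw [← hg]
    refine PySem.List.foldl_congr_mem _ _ _ _ ?_
    intro acc x _hx
    refine if_congr ?_ rfl rfl
    constructor
    · rintro ⟨hz, hge⟩
      refine ⟨fun hc => ((hin x).mp hz) ((PySem.Set.contains_iff _ _).mp hc), ?_⟩
      rw [PySem.List.len_eq, ← hout x]
      exact hge
    · rintro ⟨hc, hge⟩
      refine ⟨(hin x).mpr (fun hm => hc ((PySem.Set.contains_iff _ _).mpr hm)), ?_⟩
      rw [PySem.List.len_eq, ← hout x] at hge
      exact hge
  have hcons : ∀ (s1 s2 : Int) (c1 c2 : Int × Int × Int), s1 = s2 → c1 = c2 →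
      [s1, c1.1, c1.2.1, c1.2.2] = [s2, c2.1, c2.2.1, c2.2.2] := by
    intro s1 s2 c1 c2 h1 h2
    rw [h1, h2]
  refine hcons _ _ _ _ hstart ?_
  have hlist : ((buildA edges).1.getD
      ((buildA edges).1.keys.foldl
        (fun st nxt => if (buildA edges).2.1.getD nxt 0 = 0 ∧ 2 ≤ (buildA edges).2.2.getD nxt 0 then nxt else st) 0) []) =
      ((buildB edges).1.getD
      ((buildB edges).1.keys.foldl
        (fun st v => if ¬ (PySem.Set.contains (buildB edges).2 v = true) ∧ 2 ≤ PySem.List.len ((buildB edges).1.getD v []) then v else st) 0) []) := by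
    rw [hstart, hg]
  refine attach_foldl_eq _ _ hlist _ _ _ ?_
  intro acc x hx hx'
  obtain ⟨hf1, hf2⟩ := component_classify
    (fun s => (buildA edges).1.getD s []) (fun s => (buildB edges).1.getD s [])
    (by funext s; rw [hg])
    (fun s => (buildA edges).2.2.getD s 0) ((edges.flatMap id).toFinset)
    (fun s t ht => List.mem_toFinset.mpr (buildA_vals edges s t ht))
    (fun s t ht => List.mem_toFinset.mpr (buildB_vals edges s t ht))
    (fun v => hout v) x
    (fun y hy => List.mem_toFinset.mpr (buildA_vals edges _ y (List.mem_singleton.mp hy ▸ hx)))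
    (fun y hy => List.mem_toFinset.mpr (buildB_vals edges _ y
      (List.mem_singleton.mp ((PySem.Set.mem_ofList _ _).mp hy) ▸ hx')))
    (PySem.Set.nodup_ofList _)
  exact if_congr hf1 rfl (if_congr hf2 rfl rfl)
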